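-- pv_equiv track=rewrite | github.com/tatarinova0903/PythonLabs1 | Экзамен/6.py | deleteColumn
-- ===== SOURCE A (Python) =====
-- def deleteColumn(mas, n, m):
--     letters = ['a', 'i', 'u', 'e', 'o', 'y']
--     # Поиск нужного столбца
--     indexColumn = 0
--     countMax = 0
--     for j in range(m):
--         count = 0
--         for i in range(n):
--             if mas[i][j] in letters:
--                 count += 1
--             else:
--                 if count > countMax:
--                     countMax = count
--                     indexColumn = j
--                 count = 0
--             if i == (n - 1) and count > countMax:
--                 countMax = count
--                 indexColumn = j
--     # Удаление столбца
--     for i in range(n):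
--         mas[i].remove(mas[i][indexColumn])
--     return mas
-- ===== SOURCE B (Python) =====
-- def deleteColumn(mas, n, m):
--     # NOTE: like A, mutates mas in place (each row loses one element) and returns it.
--     vowels = ('a', 'i', 'u', 'e', 'o', 'y')
--     # Row-major DP sweep (A goes column by column): carry, per column, the current
--     # vowel-run length `cur` and the best run seen so far `best`, updated a whole
--     # row at a time as vectors.
--     cur = [0] * m
--     best = [0] * m
--     for i in range(n):
--         row = mas[i]
--         cur = [c + 1 if row[j] in vowels else 0 for j, c in enumerate(cur)]
--         best = [max(b, c) for b, c in zip(best, cur)]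
--     # Earliest maximizer (0 when m <= 0, so the deletion below behaves like A's).
--     idx = best.index(max(best)) if m > 0 else 0
--     for i in range(n):
--         mas[i].remove(mas[i][idx])
--     return mas
-- ===== Notes on version B (the rewrite author's own statement) =====
-- stated objective: alternative
-- what changed: A scans column by column with an inline strict-max accumulator fused into the inner loop; B makes one row-major sweep maintaining per-column vectors of current and best vowel-run lengths (a transposed DP), then picks the column with best.index(max(best)).
import Mathlib
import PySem

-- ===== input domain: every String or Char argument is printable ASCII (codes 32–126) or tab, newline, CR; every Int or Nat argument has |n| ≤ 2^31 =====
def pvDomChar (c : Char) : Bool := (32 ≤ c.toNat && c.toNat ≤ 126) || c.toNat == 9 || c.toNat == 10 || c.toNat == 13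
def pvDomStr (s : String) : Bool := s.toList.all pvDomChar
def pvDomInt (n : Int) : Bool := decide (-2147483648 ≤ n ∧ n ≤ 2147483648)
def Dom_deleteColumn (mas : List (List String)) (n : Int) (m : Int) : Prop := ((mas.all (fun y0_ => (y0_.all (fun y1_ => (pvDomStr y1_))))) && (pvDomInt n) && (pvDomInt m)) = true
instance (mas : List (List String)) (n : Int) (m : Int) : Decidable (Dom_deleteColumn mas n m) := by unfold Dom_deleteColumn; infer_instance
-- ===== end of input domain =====

-- B replaces A's column-by-column scan (inline strict-max accumulator fused into the
-- inner loop) by one row-major sweep carrying per-column vectors of current/best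
-- vowel-run lengths, then best.index(max(best)); same cost, a transposed traversal.
-- Both the Python A and B mutate `mas` in place (each row loses one element) and
-- return it; the theorems here are about the return value.

-- mas[i][j]; total form: out-of-range access (excluded by Pre_) yields ""
def pvCell (mas : List (List String)) (i j : Int) : String :=
  ((PySem.List.pyGet? mas i).bind (fun row => PySem.List.pyGet? row j)).getD ""

-- one loop iteration of "for i in range(n): mas[i].remove(mas[i][idx])" (shared by both ports, as in both Pythons)
def pvRemoveAt (acc : List (List String)) (i idx : Int) : List (List String) :=
  match PySem.List.pyGet? acc i with
  | some row =>
      let v := (PySem.List.pyGet? row idx).getD ""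
      PySem.List.pySetD acc i ((PySem.List.remove? row v).getD row)
  | none => acc

-- ===== PORT A =====
-- inner loop body of A: state (indexColumn, countMax, count)
def pvA_inner (mas : List (List String)) (n j : Int) (t : Int × Int × Int) (i : Int) : Int × Int × Int :=
  let letters : List String := ["a", "i", "u", "e", "o", "y"]
  let t1 : Int × Int × Int :=
    if letters.contains (pvCell mas i j) then (t.1, t.2.1, t.2.2 + 1)
    else if t.2.2 > t.2.1 then (j, t.2.2, 0) else (t.1, t.2.1, 0)
  if i = n - 1 ∧ t1.2.2 > t1.2.1 then (j, t1.2.2, t1.2.2) else t1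

-- one column j of A's search loop: run the inner loop from (indexColumn, countMax, 0)
def pvA_col (mas : List (List String)) (n : Int) (st : Int × Int) (j : Int) : Int × Int :=
  let r := (PySem.List.pyRange 0 n 1).foldl (pvA_inner mas n j) (st.1, st.2, 0)
  (r.1, r.2.1)

def deleteColumn (mas : List (List String)) (n : Int) (m : Int) : List (List String) :=
  let sel : Int × Int := (PySem.List.pyRange 0 m 1).foldl (pvA_col mas n) (0, 0)
  (PySem.List.pyRange 0 n 1).foldl (fun acc i => pvRemoveAt acc i sel.1) mas

-- ===== PORT B =====
def pvVowelsB : List String := ["a", "i", "u", "e", "o", "y"]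

-- one row of B's DP sweep: (cur, best) vectors updated from row; enumerate = Python's enumerate
def pvBrow (row : List String) (st : List Int × List Int) : List Int × List Int :=
  let cur := (PySem.List.enumerate st.1).map
    (fun jc => if pvVowelsB.contains ((PySem.List.pyGet? row jc.1).getD "") then jc.2 + 1 else 0)
  let best := (st.2.zip cur).map (fun bc => max bc.1 bc.2)
  (cur, best)

def deleteColumn_alt (mas : List (List String)) (n : Int) (m : Int) : List (List String) :=
  -- [0] * m : Python list repetition, empty for m ≤ 0 (= replicate m.toNat)
  let fin := (PySem.List.pyRange 0 n 1).foldl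
      (fun st i => pvBrow ((PySem.List.pyGet? mas i).getD []) st)
      (List.replicate m.toNat 0, List.replicate m.toNat 0)
  let best := fin.2
  -- idx = best.index(max(best)) if m > 0 else 0
  let idx : Int :=
    if 0 < m then
      match PySem.List.max? best (fun x => x) with
      | some mx => ((PySem.List.index? best mx).getD 0 : Nat)
      | none => 0
    else 0
  (PySem.List.pyRange 0 n 1).foldl (fun acc i => pvRemoveAt acc i idx) mas

-- ===== PRECONDITION & SPEC =====
-- Pre_ excludes exactly the inputs where the Python A raises an IndexError:
-- n exceeding the number of rows, or some of the first n rows shorter than max(m,1).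
def Pre_deleteColumn (mas : List (List String)) (n : Int) (m : Int) : Prop :=
  n ≤ (mas.length : Int) ∧ ∀ row ∈ mas.take n.toNat, max m 1 ≤ (row.length : Int)
instance (mas : List (List String)) (n : Int) (m : Int) : Decidable (Pre_deleteColumn mas n m) := by
  unfold Pre_deleteColumn; infer_instance

def pvWitness_deleteColumn : List (List String) × Int × Int :=
  ([["a", "b"], ["x", "o"]], 2, 2)

def Spec_deleteColumn (mas : List (List String)) (n : Int) (m : Int) (out : List (List String)) : Prop := out = deleteColumn_alt mas n m
instance (mas : List (List String)) (n : Int) (m : Int) (out : List (List String)) : Decidable (Spec_deleteColumn mas n m out) := by unfold Spec_deleteColumn; infer_instance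

-- ===== CLAIM (what is proved, stated in full; the proofs are below) =====
def Claim_equal_deleteColumn : Prop := ∀ (mas : List (List String)) (n : Int) (m : Int), Dom_deleteColumn mas n m → Pre_deleteColumn mas n m → Spec_deleteColumn mas n m (deleteColumn mas n m)

-- ===== LEMMAS AND PROOFS =====

-- the vowel flag both ports test on cell (i, j)
def pvFlag (mas : List (List String)) (j i : Int) : Bool :=
  (["a", "i", "u", "e", "o", "y"] : List String).contains (pvCell mas i j)

-- A's inner step without the  i == n-1  end check
def pvStep1 (j : Int) (v : Int → Bool) (t : Int × Int × Int) (i : Int) : Int × Int × Int :=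
  if v i then (t.1, t.2.1, t.2.2 + 1)
  else if t.2.2 > t.2.1 then (j, t.2.2, 0) else (t.1, t.2.1, 0)

-- the end check, applied once after the last iteration
def pvEnd (j : Int) (t : Int × Int × Int) : Int × Int × Int :=
  if t.2.2 > t.2.1 then (j, t.2.2, t.2.2) else t

-- the scalar run step of B's column j: state (best, cur)
def pvStepR (v : Int → Bool) (b : Int × Int) (i : Int) : Int × Int :=
  let cur : Int := if v i then b.2 + 1 else 0
  (if cur > b.1 then cur else b.1, cur)

-- longest vowel run in column j (the scalar shadow of B's vectors)
def pvRun (mas : List (List String)) (n j : Int) : Int :=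
  ((PySem.List.pyRange 0 n 1).foldl (pvStepR (pvFlag mas j)) (0, 0)).1

lemma pvA_inner_eq (mas : List (List String)) (n j : Int) (t : Int × Int × Int) (i : Int) :
    pvA_inner mas n j t i =
      (if i = n - 1 then pvEnd j (pvStep1 j (pvFlag mas j) t i) else pvStep1 j (pvFlag mas j) t i) := by
  simp only [pvA_inner, pvStep1, pvEnd, pvFlag]
  by_cases h : i = n - 1 <;> by_cases hv : (["a", "i", "u", "e", "o", "y"] : List String).contains (pvCell mas i j) <;>
    split_ifs <;> simp_all

-- A's inner fold, with the end check fused in, equals the plain fold followed by the end fix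
lemma inner_decomp (mas : List (List String)) (n j : Int) (hn : 0 < n) (t : Int × Int × Int) :
    (PySem.List.pyRange 0 n 1).foldl (pvA_inner mas n j) t =
      pvEnd j ((PySem.List.pyRange 0 n 1).foldl (pvStep1 j (pvFlag mas j)) t) := by
  have hsplit : PySem.List.pyRange 0 n 1 = PySem.List.pyRange 0 (n - 1) 1 ++ [n - 1] := by
    have := PySem.List.pyRange_one_succ_right (a := 0) (b := n - 1) (by omega)
    simpa using this
  rw [hsplit, List.foldl_append, List.foldl_append]
  simp only [List.foldl_cons, List.foldl_nil]
  have hpre : (PySem.List.pyRange 0 (n - 1) 1).foldl (pvA_inner mas n j) t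
      = (PySem.List.pyRange 0 (n - 1) 1).foldl (pvStep1 j (pvFlag mas j)) t := by
    refine PySem.List.foldl_congr_mem _ _ _ _ (fun acc i hi => ?_)
    have : i < n - 1 := (PySem.List.mem_pyRange_one.mp hi).2
    rw [pvA_inner_eq]
    simp [show ¬ i = n - 1 by omega]
  rw [hpre, pvA_inner_eq]
  simp

-- invariant coupling A's plain inner state with the scalar run state
def pvInv (j i0 c0 : Int) (a : Int × Int × Int) (b : Int × Int) : Prop :=
  a.2.2 = b.2 ∧ 0 ≤ b.2 ∧ b.2 ≤ b.1 ∧ max a.2.1 a.2.2 = max c0 b.1 ∧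
    ((a.1 = i0 ∧ a.2.1 = c0) ∨ (a.1 = j ∧ c0 < a.2.1))

lemma pvInv_step (j i0 c0 : Int) (v : Int → Bool) (a : Int × Int × Int) (b : Int × Int)
    (h : pvInv j i0 c0 a b) (i : Int) :
    pvInv j i0 c0 (pvStep1 j v a i) (pvStepR v b i) := by
  obtain ⟨h1, h2, h3, h4, h5⟩ := h
  simp only [pvInv, pvStep1, pvStepR]
  by_cases hv : v i <;> simp only [hv, if_true, if_false, Bool.false_eq_true] <;>
    split_ifs <;>
    rcases h5 with ⟨e1, e2⟩ | ⟨e1, e2⟩ <;>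
    refine ⟨?_, ?_, ?_, ?_, ?_⟩ <;> simp_all <;> omega

lemma pvInv_fold (j i0 c0 : Int) (v : Int → Bool) :
    ∀ (is : List Int) (a : Int × Int × Int) (b : Int × Int), pvInv j i0 c0 a b →
      pvInv j i0 c0 (is.foldl (pvStep1 j v) a) (is.foldl (pvStepR v) b)
  | [], _, _, h => h
  | i :: is, a, b, h => pvInv_fold j i0 c0 v is _ _ (pvInv_step j i0 c0 v a b h i)

-- one full column of A equals "compare the column's run against the accumulator"
lemma column_eq (mas : List (List String)) (n j : Int) (st : Int × Int) (hc : 0 ≤ st.2) :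
    pvA_col mas n st j = (if pvRun mas n j > st.2 then (j, pvRun mas n j) else st) := by
  unfold pvA_col
  by_cases hn : n ≤ 0
  · rw [PySem.List.pyRange_one_eq_nil (by omega)]
    have : pvRun mas n j = 0 := by
      unfold pvRun; rw [PySem.List.pyRange_one_eq_nil (by omega)]; rfl
    simp [this, show ¬ (0 : Int) > st.2 by omega]
  · rw [inner_decomp mas n j (by omega)]
    have hinv := pvInv_fold j st.1 st.2 (pvFlag mas j) (PySem.List.pyRange 0 n 1)
      (st.1, st.2, 0) (0, 0) ⟨rfl, le_refl 0, le_refl 0, by simp, Or.inl ⟨rfl, rfl⟩⟩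
    set a := (PySem.List.pyRange 0 n 1).foldl (pvStep1 j (pvFlag mas j)) (st.1, st.2, 0) with ha
    set b := (PySem.List.pyRange 0 n 1).foldl (pvStepR (pvFlag mas j)) (0, 0) with hb
    obtain ⟨h1, h2, h3, h4, h5⟩ := hinv
    rw [pvRun, ← hb]
    simp only [pvEnd]
    rcases h5 with ⟨e1, e2⟩ | ⟨e1, e2⟩ <;> split_ifs with hgt hgt <;>
      refine Prod.ext ?_ ?_ <;> simp_all <;> omega

lemma run_nonneg (mas : List (List String)) (n j : Int) : 0 ≤ pvRun mas n j := by
  rw [pvRun]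
  have : ∀ (is : List Int) (b : Int × Int), 0 ≤ b.1 → b.2 ≤ b.1 →
      0 ≤ (is.foldl (pvStepR (pvFlag mas j)) b).1 := by
    intro is
    induction is with
    | nil => intro b h _; exact h
    | cons i is ih =>
        intro b h1 h2
        refine ih _ ?_ ?_ <;> (simp only [pvStepR]; split_ifs <;> simp_all <;> omega)
  exact this _ (0, 0) le_rfl le_rfl

-- B's nested access  (mas[i] or [])[j]  computes the same cell as pvCell
lemma cell_via_row (mas : List (List String)) (i j : Int) :
    (PySem.List.pyGet? ((PySem.List.pyGet? mas i).getD []) j).getD "" = pvCell mas i j := by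
  unfold pvCell
  cases PySem.List.pyGet? mas i with
  | none => simp [PySem.List.pyGet?]
  | some r => rfl

-- the vectorized row step preserves the two lengths
lemma pvBrow_len (row : List String) (st : List Int × List Int)
    (h : st.2.length = st.1.length) :
    (pvBrow row st).1.length = st.1.length ∧ (pvBrow row st).2.length = st.1.length := by
  simp [pvBrow, PySem.List.length_enumerate, h]

-- helper: (if c > b then c else b) is max b c
lemma if_gt_eq_max (b c : Int) : (if c > b then c else b) = max b c := by
  rw [max_def]; split_ifs <;> omega

-- the vectorized row step acts on column j exactly as the scalar step pvStepR
lemma pvBrow_get (mas : List (List String)) (i : Int) (st : List Int × List Int)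
    (j : Nat) (b c : Int)
    (hb : st.2[j]? = some b) (hc : st.1[j]? = some c) :
    (pvBrow ((PySem.List.pyGet? mas i).getD []) st).1[j]? = some ((pvStepR (pvFlag mas (j : Int)) (b, c) i).2) ∧
    (pvBrow ((PySem.List.pyGet? mas i).getD []) st).2[j]? = some ((pvStepR (pvFlag mas (j : Int)) (b, c) i).1) := by
  have hflag : pvVowelsB.contains
      ((PySem.List.pyGet? ((PySem.List.pyGet? mas i).getD []) ((0 : Int) + (j : Int))).getD "")
      = pvFlag mas (j : Int) i := by
    rw [show (0 : Int) + (j : Int) = (j : Int) by ring, cell_via_row]; rfl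
  have hcur : (pvBrow ((PySem.List.pyGet? mas i).getD []) st).1[j]?
      = some (if pvFlag mas (j : Int) i then c + 1 else 0) := by
    show ((PySem.List.enumerate st.1).map _)[j]? = _
    rw [List.getElem?_map, PySem.List.getElem?_enumerate, hc, Option.map_some, Option.map_some]
    exact congrArg some (by rw [← hflag])
  refine ⟨?_, ?_⟩
  · rw [hcur]; simp [pvStepR]
  · have hz : (st.2.zip (pvBrow ((PySem.List.pyGet? mas i).getD []) st).1)[j]?
        = some (b, if pvFlag mas (j : Int) i then c + 1 else 0) :=
      List.getElem?_zip_eq_some.mpr ⟨hb, hcur⟩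
    show ((st.2.zip (pvBrow ((PySem.List.pyGet? mas i).getD []) st).1).map (fun bc => max bc.1 bc.2))[j]? = _
    rw [List.getElem?_map, hz, Option.map_some]
    exact congrArg some (by simp only [pvStepR]; rw [if_gt_eq_max])

-- B's whole sweep keeps the lengths of both vectors
lemma vec_fold_len (mas : List (List String)) :
    ∀ (is : List Int) (st : List Int × List Int), st.2.length = st.1.length →
      ((is.foldl (fun st i => pvBrow ((PySem.List.pyGet? mas i).getD []) st) st).1.length = st.1.length ∧
       (is.foldl (fun st i => pvBrow ((PySem.List.pyGet? mas i).getD []) st) st).2.length = st.1.length)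
  | [], _, h => ⟨rfl, h⟩
  | i :: is, st, h => by
      have hs := pvBrow_len ((PySem.List.pyGet? mas i).getD []) st h
      have := vec_fold_len mas is (pvBrow ((PySem.List.pyGet? mas i).getD []) st) (hs.2.trans hs.1.symm)
      simp only [List.foldl_cons]
      exact ⟨this.1.trans hs.1, this.2.trans hs.1⟩

-- column j of B's sweep is the scalar fold of pvStepR
lemma vec_fold_get (mas : List (List String)) :
    ∀ (is : List Int) (st : List Int × List Int) (j : Nat) (b c : Int),
      st.2.length = st.1.length → st.2[j]? = some b → st.1[j]? = some c →
      ((is.foldl (fun st i => pvBrow ((PySem.List.pyGet? mas i).getD []) st) st).1[j]?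
          = some ((is.foldl (pvStepR (pvFlag mas (j : Int))) (b, c)).2) ∧
       (is.foldl (fun st i => pvBrow ((PySem.List.pyGet? mas i).getD []) st) st).2[j]?
          = some ((is.foldl (pvStepR (pvFlag mas (j : Int))) (b, c)).1))
  | [], _, _, _, _, _, hb, hc => ⟨hc, hb⟩
  | i :: is, st, j, b, c, h, hb, hc => by
      have hs := pvBrow_len ((PySem.List.pyGet? mas i).getD []) st h
      have hg := pvBrow_get mas i st j b c hb hc
      have := vec_fold_get mas is (pvBrow ((PySem.List.pyGet? mas i).getD []) st) j
        ((pvStepR (pvFlag mas (j : Int)) (b, c) i).1) ((pvStepR (pvFlag mas (j : Int)) (b, c) i).2)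
        (hs.2.trans hs.1.symm) hg.2 hg.1
      simpa using this

-- the best vector after B's sweep is the list of per-column longest runs
lemma best_eq (mas : List (List String)) (n m : Int) :
    ((PySem.List.pyRange 0 n 1).foldl (fun st i => pvBrow ((PySem.List.pyGet? mas i).getD []) st)
        (List.replicate m.toNat 0, List.replicate m.toNat 0)).2
      = (List.range m.toNat).map (fun k : Nat => pvRun mas n (k : Int)) := by
  have hlen := vec_fold_len mas (PySem.List.pyRange 0 n 1)
    (List.replicate m.toNat 0, List.replicate m.toNat 0) (by simp)
  apply List.ext_getElem?
  intro j
  by_cases hj : j < m.toNat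
  · have hg := vec_fold_get mas (PySem.List.pyRange 0 n 1)
      (List.replicate m.toNat 0, List.replicate m.toNat 0) j 0 0 (by simp)
      (by simp [hj]) (by simp [hj])
    rw [hg.2, List.getElem?_map, List.getElem?_range]
    · rfl
    · exact hj
  · have h1 : ((PySem.List.pyRange 0 n 1).foldl (fun st i => pvBrow ((PySem.List.pyGet? mas i).getD []) st)
        (List.replicate m.toNat 0, List.replicate m.toNat 0)).2.length ≤ j := by
      have := hlen.2; simp at this; omega
    rw [List.getElem?_eq_none h1, List.getElem?_eq_none (by simp; omega)]

-- idxOf? helpers for the argmax lemma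
lemma idxOf?_append_left (a : Int) : ∀ (l1 l2 : List Int), a ∈ l1 →
    List.idxOf? a (l1 ++ l2) = List.idxOf? a l1
  | b :: t, l2, h => by
      by_cases hba : b = a
      · simp [List.idxOf?_cons, hba]
      · have ht : a ∈ t := by
          rcases List.mem_cons.mp h with h | h
          · exact absurd h.symm hba
          · exact h
        simp only [List.cons_append, List.idxOf?_cons, beq_iff_eq, hba, if_false,
          idxOf?_append_left a t l2 ht]

lemma idxOf?_append_self (a : Int) : ∀ (l : List Int), a ∉ l →
    List.idxOf? a (l ++ [a]) = some l.length
  | [], _ => by simp [List.idxOf?_cons]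
  | b :: t, h => by
      have hba : ¬ b = a := fun e => h (e ▸ List.mem_cons_self)
      have ht : a ∉ t := fun e => h (List.mem_cons_of_mem b e)
      simp only [List.cons_append, List.idxOf?_cons, beq_iff_eq, hba, if_false,
        idxOf?_append_self a t ht, Option.map_some, List.length_cons]

-- earliest-strict-maximizer fold = index of the first maximum of the value list
lemma argmax_fold (g : Int → Int) (hg : ∀ j, 0 ≤ g j) :
    ∀ (t : Nat), 0 < t →
      ∃ (mx : Int) (k : Nat),
        PySem.List.max? (((List.range t).map (fun k : Nat => (k : Int))).map g) (fun x => x) = some mx ∧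
        List.idxOf? mx (((List.range t).map (fun k : Nat => (k : Int))).map g) = some k ∧
        ((List.range t).map (fun k : Nat => (k : Int))).foldl
          (fun (bc : Int × Int) j => if g j > bc.2 then (j, g j) else bc) (0, 0) = ((k : Int), mx) := by
  intro t
  induction t with
  | zero => intro h; omega
  | succ s ih =>
      intro _
      by_cases hs : 0 < s
      · obtain ⟨mx, k, h1, h2, h3⟩ := ih hs
        have hsplit : (List.range (s + 1)).map (fun k : Nat => (k : Int))
            = (List.range s).map (fun k : Nat => (k : Int)) ++ [(s : Int)] := by
          rw [List.range_succ, List.map_append]; rfl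
        set rs := ((List.range s).map (fun k : Nat => (k : Int))).map g with hrs
        have hlen : rs.length = s := by simp [hrs]
        have hmapone : List.map g [(s : Int)] = [g (s : Int)] := rfl
        by_cases hx : g (s : Int) > mx
        · refine ⟨g (s : Int), s, ?_, ?_, ?_⟩
          · simp only [PySem.List.max?] at h1 ⊢
            rw [hsplit, List.map_append, hmapone, List.foldl_append, ← hrs, h1]
            simp [show mx < g (s : Int) by omega]
          · have hnot : g (s : Int) ∉ rs := by
              intro hmem
              have := PySem.List.max?_isMax h1 _ hmem
              simp at this; omega
            rw [hsplit, List.map_append, hmapone, ← hrs,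
              idxOf?_append_self (g (s : Int)) rs hnot, hlen]
          · rw [hsplit, List.foldl_append, h3]
            simp [hx]
        · refine ⟨mx, k, ?_, ?_, ?_⟩
          · simp only [PySem.List.max?] at h1 ⊢
            rw [hsplit, List.map_append, hmapone, List.foldl_append, ← hrs, h1]
            simp [show ¬ mx < g (s : Int) by omega]
          · have hmem : mx ∈ rs := PySem.List.max?_mem h1
            rw [hsplit, List.map_append, hmapone, ← hrs,
              idxOf?_append_left mx rs _ hmem]
            exact h2
          · rw [hsplit, List.foldl_append, h3]
            simp [hx]
      · have hs0 : s = 0 := by omega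
        subst hs0
        refine ⟨g ((0 : Nat) : Int), 0, ?_, ?_, ?_⟩
        · simp [PySem.List.max?]
        · simp [List.idxOf?_cons]
        · simp only [List.range_succ, List.range_zero, List.nil_append, List.map_cons, List.map_nil,
            List.foldl_cons, List.foldl_nil]
          have h0 := hg ((0 : Nat) : Int)
          split_ifs with h
          · rfl
          · have he : g ((0 : Nat) : Int) = 0 := by omega
            rw [he]
            simp

-- A's whole selection loop, rewritten column by column, is the strict-max fold over runs
lemma sel_fold_eq (mas : List (List String)) (n : Int) :
    ∀ (is : List Int) (st : Int × Int), 0 ≤ st.2 →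
      is.foldl (pvA_col mas n) st
        = is.foldl (fun (bc : Int × Int) j => if pvRun mas n j > bc.2 then (j, pvRun mas n j) else bc) st
  | [], _, _ => rfl
  | j :: is, st, hc => by
      simp only [List.foldl_cons]
      rw [column_eq mas n j st hc]
      split_ifs with h
      · exact sel_fold_eq mas n is _ (run_nonneg mas n j)
      · exact sel_fold_eq mas n is _ hc

-- the two selected indices coincide
lemma idx_eq (mas : List (List String)) (n m : Int) :
    ((PySem.List.pyRange 0 m 1).foldl (pvA_col mas n) (0, 0)).1
      = (if 0 < m then
          match PySem.List.max?
              (((PySem.List.pyRange 0 n 1).foldl (fun st i => pvBrow ((PySem.List.pyGet? mas i).getD []) st)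
                  (List.replicate m.toNat 0, List.replicate m.toNat 0)).2) (fun x => x) with
          | some mx =>
              ((PySem.List.index?
                  (((PySem.List.pyRange 0 n 1).foldl (fun st i => pvBrow ((PySem.List.pyGet? mas i).getD []) st)
                      (List.replicate m.toNat 0, List.replicate m.toNat 0)).2) mx).getD 0 : Nat)
          | none => 0
        else (0 : Int)) := by
  by_cases hm : 0 < m
  · rw [if_pos hm]
    have ht : 0 < m.toNat := by omega
    have hmt : ((m.toNat : Nat) : Int) = m := Int.toNat_of_nonneg (by omega)
    obtain ⟨mx, k, h1, h2, h3⟩ := argmax_fold (pvRun mas n) (run_nonneg mas n) m.toNat ht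
    have hrs : (((List.range m.toNat).map (fun k : Nat => (k : Int))).map (pvRun mas n))
        = (List.range m.toNat).map (fun k : Nat => pvRun mas n (k : Int)) := by
      rw [List.map_map]; rfl
    rw [hrs] at h1 h2
    rw [best_eq mas n m, h1]
    have hrange : PySem.List.pyRange 0 m 1 = (List.range m.toNat).map (fun k : Nat => (k : Int)) := by
      rw [← hmt]; exact PySem.List.pyRange_zero_natCast m.toNat
    rw [hrange, sel_fold_eq mas n _ _ le_rfl, h3]
    show ((k : Int), mx).1
        = (((PySem.List.index? ((List.range m.toNat).map (fun k : Nat => pvRun mas n (k : Int))) mx).getD 0 : Nat) : Int)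
    rw [PySem.List.index?_eq_idxOf?, h2]
    rfl
  · rw [if_neg hm, PySem.List.pyRange_one_eq_nil (by omega)]
    rfl

-- ===== VERDICT (by name: the statement is the Claim_ definition above) =====
theorem deleteColumn_spec : Claim_equal_deleteColumn := by
  intro mas n m _ _
  unfold Spec_deleteColumn deleteColumn deleteColumn_alt
  simp only
  rw [idx_eq]
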